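-- pv_equiv track=rewrite | github.com/brt-h/Advent-of-Code-2024 | day11b.py | process_blink
-- ===== SOURCE A (Python) =====
-- def process_stone(number):
--   # cast the number to an integer as default
--   number = int(number)
--   # instantiate the number of stones
--   stones_count = 1
--   # check first rule, which applies when the number is 0
--   if number == 0:
--     return [1], stones_count # 1 stone
--   # check second rule, which applies when the number has an even number of digits
--   elif len(str(number)) % 2 == 0:
--     left = int(str(number)[:len(str(number)) // 2])
--     right = int(str(number)[len(str(number)) // 2:])
--     return [left, right], stones_count + 1 # 2 stones
--   # check third rule, which applies when none of the other rules apply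
--   else:
--     return [number * 2024], stones_count # 1 stone
--
-- def process_blink(stones_map):
--   new_stones_map = {}
--   blink_stones_count = 0
--   # stones map is a dictionary, where the key is the number of the stone, and the value is the number of the stone
--   for stone in stones_map:
--     # value is the number of occurences of a given stone number in the stones map
--     value = stones_map[stone]
--     processed, stones_count = process_stone(stone)
--     blink_stones_count += (stones_count * value)
--     for new_stone in processed:
--       new_stones_map[new_stone] = new_stones_map.get(new_stone, 0) + (1 * value)
--   return new_stones_map, blink_stones_count
-- ===== SOURCE B (Python) =====
-- def blink(number):
--     n = int(number)
--     if n == 0: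
--         return [1]
--     s = str(n)
--     if len(s) % 2 == 0:
--         half = len(s) // 2
--         return [int(s[:half]), int(s[half:])]
--     return [n * 2024]
--
-- def process_blink(stones_map):
--     # Stage 1: expand every (stone, multiplicity) into its weighted contributions.
--     contributions = [(new, value) for stone, value in stones_map.items()
--                      for new in blink(stone)]
--     # Stage 2: group the contributions by stone (first-occurrence order).
--     keys = list(dict.fromkeys(k for k, _ in contributions))
--     new_stones_map = {k: sum(v for k2, v in contributions if k2 == k) for k in keys}
--     # Stage 3: the blink count is the total weight of the finished map.
--     return new_stones_map, sum(new_stones_map.values())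
-- ===== Notes on version B (the rewrite author's own statement) =====
-- stated objective: alternative
-- what changed: B is a staged expand-group-sum pipeline: it first flattens the map into a flat list of weighted (new_stone, value) contribution pairs, then groups that list by stone (ordered dedup of keys plus a per-key rescan-and-sum) to build the new map, and finally takes the blink count as the sum of the finished map's values, instead of A's single pass that updates a dict and a running counter stone by stone.
import Mathlib
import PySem

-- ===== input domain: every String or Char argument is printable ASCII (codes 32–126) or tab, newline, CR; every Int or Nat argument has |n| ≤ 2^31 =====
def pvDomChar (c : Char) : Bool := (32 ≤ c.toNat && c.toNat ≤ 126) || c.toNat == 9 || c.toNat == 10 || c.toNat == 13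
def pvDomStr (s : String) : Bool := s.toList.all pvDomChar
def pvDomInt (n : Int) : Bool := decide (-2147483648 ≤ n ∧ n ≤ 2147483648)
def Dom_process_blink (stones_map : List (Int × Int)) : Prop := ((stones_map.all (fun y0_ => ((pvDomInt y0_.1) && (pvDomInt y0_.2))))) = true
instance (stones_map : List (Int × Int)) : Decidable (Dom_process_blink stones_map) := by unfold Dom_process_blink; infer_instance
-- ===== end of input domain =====

-- B replaces A's single pass (running dict updates plus a running blink counter) by a staged
-- expand-group-sum pipeline: flatten to weighted contribution pairs, group them by stone with an
-- ordered key dedup and a per-key rescan, then total the finished map. Objective: alternative.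

-- ===== PORT A =====
def process_stone (number : Int) : Option (List Int × Int) :=
  -- 'number = int(number)' is the identity on an int argument
  let stones_count : Int := 1
  if number = 0 then
    some ([1], stones_count)
  else if PySem.Int.mod ((PySem.Int.toChars number).length : Int) 2 = 0 then
    let s := PySem.Int.toChars number
    let h := PySem.Int.floordiv ((s.length : Int)) 2
    -- int(str(number)[:h]) / int(str(number)[h:]); none = ValueError (int('-'))
    match PySem.Int.ofChars? (PySem.List.slice s none (some h)),
          PySem.Int.ofChars? (PySem.List.slice s (some h) none) with
    | some left, some right => some ([left, right], stones_count + 1)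
    | _, _ => none
  else
    some ([number * 2024], stones_count)

def process_blink_stepA (d : PySem.Dict Int Int)
    (acc : Option (PySem.Dict Int Int × Int)) (stone : Int) :
    Option (PySem.Dict Int Int × Int) :=
  match acc with
  | none => none
  | some (new_stones_map, blink_stones_count) =>
    let value := (d.get? stone).getD 0   -- stone ∈ d.keys, so stones_map[stone] never raises
    match process_stone stone with
    | none => none                        -- the ValueError propagates
    | some (processed, stones_count) =>
      some (processed.foldl
              (fun m new_stone => m.insert new_stone (m.getD new_stone 0 + 1 * value))
              new_stones_map,
            blink_stones_count + stones_count * value)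

def process_blink (stones_map : List (Int × Int)) : (List (Int × Int)) × Int :=
  let d := PySem.Dict.ofList stones_map   -- the dict argument, in insertion order
  match d.keys.foldl (process_blink_stepA d) (some (PySem.Dict.empty, 0)) with
  | some (new_stones_map, blink_stones_count) => (new_stones_map.items, blink_stones_count)
  | none => ([], 0)   -- unreachable under Pre_process_blink (Python A raises ValueError here)

-- ===== PORT B =====
def blink (n : Int) : Option (List Int) :=
  if n = 0 then
    some [1]
  else
    let s := PySem.Int.toChars n
    if PySem.Int.mod ((s.length : Int)) 2 = 0 then
      let half := PySem.Int.floordiv ((s.length : Int)) 2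
      match PySem.Int.ofChars? (PySem.List.slice s none (some half)),
            PySem.Int.ofChars? (PySem.List.slice s (some half) none) with
      | some l, some r => some [l, r]
      | _, _ => none   -- ValueError (int('-'))
    else
      some [n * 2024]

-- stage 1: the contribution-pairs comprehension (none = a ValueError inside it)
def contribStep (acc : Option (List (Int × Int))) (kv : Int × Int) :
    Option (List (Int × Int)) :=
  match acc, blink kv.1 with
  | some cs, some ns => some (cs ++ ns.map (fun s => (s, kv.2)))
  | _, _ => none

def contribs? (items : List (Int × Int)) : Option (List (Int × Int)) :=
  items.foldl contribStep (some [])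

def process_blink_alt (stones_map : List (Int × Int)) : (List (Int × Int)) × Int :=
  let d := PySem.Dict.ofList stones_map   -- the dict argument, in insertion order
  match contribs? d.items with
  | none => ([], 0)   -- unreachable under Pre_process_blink (Python B raises ValueError here)
  | some cs =>
    -- stage 2: keys = list(dict.fromkeys(...)); the dict comprehension grouping by key
    let keys := PySem.List.dedup (cs.map Prod.fst)
    let new_stones_map := keys.map
      (fun k => (k, ((cs.filter (fun p => p.1 == k)).map Prod.snd).sum))
    -- stage 3: sum(new_stones_map.values())
    (new_stones_map, (new_stones_map.map Prod.snd).sum)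

-- ===== PRECONDITION & SPEC =====
-- Pre_ excludes maps containing a single-digit negative stone number (-9..-1), exactly the
-- inputs on which both Pythons raise ValueError (int('-') on the left half of e.g. str(-1)).
def Pre_process_blink (stones_map : List (Int × Int)) : Prop :=
  ∀ p ∈ stones_map, ¬ (-9 ≤ p.1 ∧ p.1 ≤ -1)
instance (stones_map : List (Int × Int)) : Decidable (Pre_process_blink stones_map) := by
  unfold Pre_process_blink; infer_instance

def pvWitness_process_blink : (List (Int × Int)) := [(125, 1), (17, 1), (0, 3)]

def Spec_process_blink (stones_map : List (Int × Int)) (out : (List (Int × Int)) × Int) : Prop :=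
  out = process_blink_alt stones_map
instance (stones_map : List (Int × Int)) (out : (List (Int × Int)) × Int) :
    Decidable (Spec_process_blink stones_map out) := by unfold Spec_process_blink; infer_instance

-- ===== CLAIM (what is proved, stated in full; the proofs are below) =====
def Claim_equal_process_blink : Prop :=
  ∀ (stones_map : List (Int × Int)), Dom_process_blink stones_map →
    Pre_process_blink stones_map →
    Spec_process_blink stones_map (process_blink stones_map)

-- ===== LEMMAS AND PROOFS =====

-- the weighted counter step B's result is characterised against
def counterStep (m : PySem.Dict Int Int) (p : Int × Int) : PySem.Dict Int Int :=
  m.insert p.1 (m.getD p.1 0 + p.2)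

-- A's helper returns exactly B's successor list paired with its length.
lemma stone_rel (n : Int) :
    process_stone n = (blink n).map (fun l => (l, (l.length : Int))) := by
  unfold process_stone blink
  by_cases h0 : n = 0
  · simp [h0]
  · simp only [h0, if_false]
    by_cases he : PySem.Int.mod ((PySem.Int.toChars n).length : Int) 2 = 0
    · simp only [he, if_true]
      rcases hL : PySem.Int.ofChars? (PySem.List.slice (PySem.Int.toChars n) none
          (some (PySem.Int.floordiv (((PySem.Int.toChars n).length : Int)) 2))) with _ | l <;>
        rcases hR : PySem.Int.ofChars? (PySem.List.slice (PySem.Int.toChars n)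
          (some (PySem.Int.floordiv (((PySem.Int.toChars n).length : Int)) 2)) none) with _ | r <;>
        simp
    · simp only [he, if_false]
      simp

-- A's loop step, re-expressed over the dict's (key, value) pairs
def stepAP (acc : Option (PySem.Dict Int Int × Int)) (kv : Int × Int) :
    Option (PySem.Dict Int Int × Int) :=
  match acc with
  | none => none
  | some (m, c) =>
    match process_stone kv.1 with
    | none => none
    | some (processed, stones_count) =>
      some (processed.foldl
              (fun m s => m.insert s (m.getD s 0 + 1 * kv.2)) m,
            c + stones_count * kv.2)

lemma foldAP_none (ps : List (Int × Int)) : ps.foldl stepAP none = none := by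
  induction ps with
  | nil => rfl
  | cons p t ih => simpa [stepAP] using ih

lemma foldContrib_none (ps : List (Int × Int)) : ps.foldl contribStep none = none := by
  induction ps with
  | nil => rfl
  | cons p t ih => simpa [contribStep] using ih

-- pulling the accumulator out of the contribution fold
lemma contrib_acc (ps : List (Int × Int)) (cs0 : List (Int × Int)) :
    ps.foldl contribStep (some cs0)
      = (ps.foldl contribStep (some [])).map (fun cs => cs0 ++ cs) := by
  induction ps generalizing cs0 with
  | nil => simp
  | cons p t ih =>
    rcases hb : blink p.1 with _ | ns
    · simp [contribStep, hb, foldContrib_none]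
    · simp only [List.foldl_cons, contribStep, hb, List.nil_append]
      rw [ih (cs0 ++ ns.map fun s => (s, p.2)), ih (ns.map fun s => (s, p.2))]
      cases t.foldl contribStep (some []) <;> simp

-- A's loop over the pairs IS: flatten, then fold the weighted counter and sum the weights
lemma loopA (ps : List (Int × Int)) (m : PySem.Dict Int Int) (c : Int) :
    ps.foldl stepAP (some (m, c))
      = match ps.foldl contribStep (some []) with
        | none => none
        | some cs => some (cs.foldl counterStep m, c + (cs.map Prod.snd).sum) := by
  induction ps generalizing m c with
  | nil => simp
  | cons p t ih =>
    rcases hb : blink p.1 with _ | ns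
    · have ha : process_stone p.1 = none := by rw [stone_rel, hb]; rfl
      simp [stepAP, contribStep, ha, hb, foldAP_none, foldContrib_none]
    · have ha : process_stone p.1 = some (ns, (ns.length : Int)) := by rw [stone_rel, hb]; rfl
      simp only [List.foldl_cons, stepAP, contribStep, ha, hb, List.nil_append]
      have hinner : ns.foldl (fun m s => m.insert s (m.getD s 0 + 1 * p.2)) m
          = (ns.map fun s => (s, p.2)).foldl counterStep m := by
        rw [List.foldl_map]; simp [counterStep]
      rw [hinner, ih]
      rw [contrib_acc t (ns.map fun s => (s, p.2))]
      cases h : t.foldl contribStep (some []) with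
      | none => simp
      | some cs =>
        simp only [Option.map_some]
        rw [List.foldl_append]
        have hsum : ((ns.map fun s => (s, p.2)).map Prod.snd).sum = (ns.length : Int) * p.2 := by
          rw [List.map_map]
          simp [Function.comp_def, mul_comm]
        simp only [List.map_append, List.sum_append, hsum]
        ring_nf

-- the weighted-counter fold's items are exactly B's group-by list
lemma counter_items (cs : List (Int × Int)) :
    (cs.foldl counterStep PySem.Dict.empty).items
      = (PySem.Set.ofList (cs.map Prod.fst)).map
          (fun k => (k, ((cs.filter (fun p => p.1 == k)).map Prod.snd).sum)) := by
  induction cs using List.reverseRecOn with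
  | nil => rfl
  | append_singleton cs p ih =>
    have hnd : (cs.foldl counterStep PySem.Dict.empty).keys.Nodup :=
      PySem.Dict.nodup_keys_foldl_insert_key cs Prod.fst
        (fun m p => m.getD p.1 0 + p.2) _ PySem.Dict.nodup_keys_empty
    have hkeys : (cs.foldl counterStep PySem.Dict.empty).keys
        = PySem.Set.ofList (cs.map Prod.fst) := by
      show (cs.foldl counterStep PySem.Dict.empty).items.map Prod.fst = _
      rw [ih, List.map_map]
      simp [Function.comp_def]
    have hofL : PySem.Set.ofList ((cs ++ [p]).map Prod.fst)
        = PySem.Set.add (PySem.Set.ofList (cs.map Prod.fst)) p.1 := by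
      rw [List.map_append]
      simpa using PySem.Set.ofList_append_singleton (cs.map Prod.fst) p.1
    have hfilter : ∀ k, (cs ++ [p]).filter (fun q => q.1 == k)
        = cs.filter (fun q => q.1 == k) ++ (if p.1 = k then [p] else []) := by
      intro k
      rw [List.filter_append]
      by_cases hk : p.1 = k <;> simp [hk]
    rw [List.foldl_append, List.foldl_cons, List.foldl_nil]
    by_cases hm : p.1 ∈ cs.map Prod.fst
    · have hcont : (cs.foldl counterStep PySem.Dict.empty).contains p.1 = true := by
        rw [PySem.Dict.contains_eq_decide_mem_keys, hkeys]
        simp [PySem.Set.mem_ofList, hm]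
      have hgd : (cs.foldl counterStep PySem.Dict.empty).getD p.1 0
          = ((cs.filter (fun q => q.1 == p.1)).map Prod.snd).sum := by
        apply PySem.Dict.getD_of_mem_items _ _ hnd
        rw [ih]
        exact List.mem_map_of_mem (by simp [PySem.Set.mem_ofList, hm])
      rw [show counterStep (cs.foldl counterStep PySem.Dict.empty) p
            = (cs.foldl counterStep PySem.Dict.empty).insert p.1
                ((cs.foldl counterStep PySem.Dict.empty).getD p.1 0 + p.2) from rfl]
      rw [PySem.Dict.items_insert_of_contains _ _ hcont, ih, hofL,
        PySem.Set.add_of_mem (by simp [PySem.Set.mem_ofList, hm]), List.map_map]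
      apply List.map_congr_left
      intro k hk
      by_cases hkp : k = p.1
      · subst hkp
        simp only [Function.comp_def, beq_self_eq_true, if_pos]
        rw [hgd, hfilter]
        simp
      · have : ¬ (k == p.1) = true := by simp [hkp]
        simp only [Function.comp_def, this, hfilter k,
          if_neg (fun h => hkp (Eq.symm h)), List.append_nil]
        simp
    · have hcont : (cs.foldl counterStep PySem.Dict.empty).contains p.1 = false := by
        rw [PySem.Dict.contains_eq_decide_mem_keys, hkeys]
        simp [PySem.Set.mem_ofList, hm]
      have hgd : (cs.foldl counterStep PySem.Dict.empty).getD p.1 0 = 0 :=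
        PySem.Dict.getD_of_not_contains _ _ hcont
      have hfe : cs.filter (fun q => q.1 == p.1) = [] := by
        rw [List.filter_eq_nil_iff]
        intro q hq hq1
        apply hm
        have hq1' : q.1 = p.1 := by simpa using hq1
        simpa [hq1'] using List.mem_map_of_mem (f := Prod.fst) hq
      rw [show counterStep (cs.foldl counterStep PySem.Dict.empty) p
            = (cs.foldl counterStep PySem.Dict.empty).insert p.1
                ((cs.foldl counterStep PySem.Dict.empty).getD p.1 0 + p.2) from rfl]
      rw [PySem.Dict.items_insert_of_not_contains _ _ hcont, ih, hofL,
        PySem.Set.add_of_not_mem (by simp [PySem.Set.mem_ofList, hm])]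
      rw [List.map_append]
      congr 1
      · apply List.map_congr_left
        intro k hk
        have hkp : k ≠ p.1 := by
          intro h
          apply hm
          rw [h] at hk
          simpa [PySem.Set.mem_ofList] using hk
        rw [hfilter k, if_neg (fun h => hkp (Eq.symm h)), List.append_nil]
      · rw [hgd]
        simp [hfilter, hfe]

-- replacing the (unique) entry at key k by w + v raises the sum of the second components by v
lemma sum_replace (k v : Int) :
    ∀ (l : List (Int × Int)) (w : Int), (l.map Prod.fst).Nodup →
      List.find? (fun p => p.1 == k) l = some (k, w) →
      ((l.map (fun p => if p.1 == k then (k, w + v) else p)).map Prod.snd).sum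
        = (l.map Prod.snd).sum + v := by
  intro l
  induction l with
  | nil => intro w _ hf; simp at hf
  | cons p t ih =>
    intro w hnd hf
    by_cases hk : p.1 = k
    · have hfind : List.find? (fun p => p.1 == k) (p :: t) = some p :=
        List.find?_cons_of_pos (by simp [hk])
      have hp : p = (k, w) := by
        rw [hfind] at hf; exact Option.some.inj hf
      have hknot : k ∉ t.map Prod.fst := by
        have h1 : p.1 ∉ t.map Prod.fst := (List.nodup_cons.mp (by simpa using hnd)).1
        simpa [hk] using h1
      have hmap2 : List.map (Prod.snd ∘ fun p => if p.1 = k then (k, w + v) else p) t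
          = List.map Prod.snd t := by
        apply List.map_congr_left
        intro q hq
        have hqk : q.1 ≠ k := fun h => hknot (h ▸ List.mem_map_of_mem hq)
        simp [hqk]
      simp [hp, hmap2]
      ring
    · have hfind : List.find? (fun p => p.1 == k) (p :: t) = List.find? (fun p => p.1 == k) t :=
        List.find?_cons_of_neg (by simp [hk])
      rw [hfind] at hf
      have hnd' : (t.map Prod.fst).Nodup := (List.nodup_cons.mp (by simpa using hnd)).2
      simp only [List.map_cons, List.sum_cons, if_neg (by simpa using hk : ¬ (p.1 == k) = true)]
      rw [ih _ hnd' hf]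
      ring

-- one insert of 'current value + v' raises the sum of the dict's values by v (unique keys)
lemma dict_sum_insert_add (d : PySem.Dict Int Int) (k v : Int) (h : d.keys.Nodup) :
    ((d.insert k (d.getD k 0 + v)).values).sum = d.values.sum + v := by
  by_cases hc : d.contains k = true
  · rcases hf : List.find? (fun p => p.1 == k) d.items with _ | p
    · exfalso
      rcases List.any_eq_true.mp hc with ⟨q, hq, hqk⟩
      exact absurd (List.find?_eq_none.mp hf q hq) (by simp_all)
    · have hpk : p.1 = k := by simpa using List.find?_some hf
      have hgd : d.getD k 0 = p.2 := by
        simp [PySem.Dict.getD_eq_get?_getD, PySem.Dict.get?, hf]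
      have hf' : List.find? (fun q => q.1 == k) d.items = some (k, p.2) := by
        rw [hf, hpk.symm]
      have hrepl := sum_replace k v d.items p.2 h hf'
      simp only [PySem.Dict.values, PySem.Dict.items_insert_of_contains d _ hc, hgd]
      exact hrepl
  · have hc' : d.contains k = false := by simpa using hc
    simp [PySem.Dict.values, PySem.Dict.items_insert_of_not_contains d _ hc',
      PySem.Dict.getD_of_not_contains d _ hc']

-- the weighted-counter fold's value total is the total of the weights
lemma counter_values_sum (cs : List (Int × Int)) :
    ∀ (m : PySem.Dict Int Int), m.keys.Nodup →
      ((cs.foldl counterStep m).values).sum = m.values.sum + (cs.map Prod.snd).sum := by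
  induction cs with
  | nil => intro m _; simp
  | cons p t ih =>
    intro m hm
    have h2 : (counterStep m p).keys.Nodup := PySem.Dict.nodup_keys_insert _ _ _ hm
    have hstep : ((counterStep m p).values).sum = m.values.sum + p.2 :=
      dict_sum_insert_add m p.1 p.2 hm
    simp only [List.foldl_cons, ih _ h2, hstep, List.map_cons, List.sum_cons]
    ring

-- ===== VERDICT (by name: the statement is the Claim_ definition above) =====
theorem process_blink_spec : Claim_equal_process_blink := by
  intro stones_map _ _
  unfold Spec_process_blink
  simp only [process_blink, process_blink_alt, contribs?]
  have hd : (PySem.Dict.ofList stones_map).keys.Nodup := PySem.Dict.nodup_keys_ofList _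
  have hfun : (fun (acc : Option (PySem.Dict Int Int × Int)) (k : Int) =>
        stepAP acc (k, (PySem.Dict.ofList stones_map).getD k 0))
      = process_blink_stepA (PySem.Dict.ofList stones_map) := by
    funext acc k
    rcases acc with _ | ⟨m, c⟩
    · rfl
    · simp only [stepAP, process_blink_stepA, PySem.Dict.getD_eq_get?_getD]
  have hA : (PySem.Dict.ofList stones_map).keys.foldl
        (process_blink_stepA (PySem.Dict.ofList stones_map)) (some (PySem.Dict.empty, 0))
      = (PySem.Dict.ofList stones_map).items.foldl stepAP (some (PySem.Dict.empty, 0)) := by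
    conv_rhs => rw [PySem.Dict.items_eq_map_keys _ hd 0]
    rw [List.foldl_map, hfun]
  rw [hA, loopA]
  rcases h : (PySem.Dict.ofList stones_map).items.foldl contribStep (some []) with _ | cs
  · rfl
  · simp only
    have hv : ((cs.foldl counterStep PySem.Dict.empty).items.map (fun x => x.2)).sum
        = (cs.map Prod.snd).sum := by
      have := counter_values_sum cs PySem.Dict.empty PySem.Dict.nodup_keys_empty
      simp only [PySem.Dict.values] at this
      rw [show (PySem.Dict.empty : PySem.Dict Int Int).items = [] from rfl] at this
      simpa using this
    rw [counter_items] at hv ⊢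
    simp only [PySem.List.dedup_eq_ofList, zero_add]
    refine Prod.ext rfl ?_
    simp only [List.map_map, Function.comp_def] at hv ⊢
    exact hv.symm
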